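-- pv_equiv track=rewrite | github.com/Mikhail-Z-P/now_my_prj | tests/test_demo.py | get_mask_card_number
-- ===== SOURCE A (Python) =====
-- def get_mask_card_number(bank_card: str) -> str:
--     """Функцыя разделяет по блокам четыре цыфры и скрывает цыфры идущие посло 6 и до 4 с конца"""
--
--     count_four = 0
--     account = 0
--     card_number = ""
--
--     for card in bank_card:
--         account += 1
--         if account <= 6 or account > 12:
--             card_number += card
--         elif 12 >= account >= 6:
--             card = "*"
--             card_number += card
--         count_four += 1
--         if count_four % 4 == 0 and card != len(bank_card) - 1:
--             card_number += " "
--     return card_number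
-- ===== SOURCE B (Python) =====
-- def get_mask_card_number(bank_card: str) -> str:
--     masked = bank_card[:6] + "*" * len(bank_card[6:12]) + bank_card[12:]
--     parts = []
--     i = 0
--     while i < len(masked):
--         chunk = masked[i:i + 4]
--         parts.append(chunk)
--         if len(chunk) == 4:
--             parts.append(" ")
--         i += 4
--     return "".join(parts)
-- ===== Notes on version B (the rewrite author's own statement) =====
-- stated objective: simpler
-- what changed: Replaces the per-character loop with three counters and a rebound loop variable by slice-based masking (keep first 6 chars, star out chars 7 through 12, keep the rest) followed by a loop that emits 4-char blocks via bulk slicing and joins them, each complete block followed by a space; the always-true string-vs-int comparison in A's space condition disappears.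
import Mathlib
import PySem

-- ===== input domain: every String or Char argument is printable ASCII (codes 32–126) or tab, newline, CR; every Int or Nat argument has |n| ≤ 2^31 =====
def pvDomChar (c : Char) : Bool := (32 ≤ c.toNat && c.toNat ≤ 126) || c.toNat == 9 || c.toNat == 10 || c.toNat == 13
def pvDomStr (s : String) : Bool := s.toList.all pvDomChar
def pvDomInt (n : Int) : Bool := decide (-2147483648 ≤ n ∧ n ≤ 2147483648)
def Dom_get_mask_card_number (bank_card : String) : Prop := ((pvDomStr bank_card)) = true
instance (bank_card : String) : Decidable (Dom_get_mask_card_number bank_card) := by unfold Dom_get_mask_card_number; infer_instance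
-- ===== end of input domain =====

-- B replaces A's three-counter per-character loop by slice masking plus a recursion over 4-char blocks (objective: simpler); same return value.

-- ===== PORT A =====
-- Python compares the str `card` with the int `len(bank_card) - 1`; in Python `str != int` is always True.
def pyStrNeInt (_card : Char) (_n : Int) : Bool := true

-- one iteration of A's for-loop body; the accumulated string is kept as List Char (exact: += appends)
def pvStepA (len : Int) (st : Int × Int × List Char) (card : Char) : Int × Int × List Char :=
  let (count_four, account, card_number) := st
  let account := account + 1
  -- `if account <= 6 or account > 12: ... elif 12 >= account >= 6:` — the elif covers all remaining cases (7..12)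
  let (card, card_number) :=
    if account ≤ 6 ∨ account > 12 then (card, card_number ++ [card])
    else ('*', card_number ++ ['*'])
  let count_four := count_four + 1
  let card_number :=
    if count_four % 4 == 0 && pyStrNeInt card (len - 1) then card_number ++ [' ']
    else card_number
  (count_four, account, card_number)

def get_mask_card_number (bank_card : String) : String :=
  let l := bank_card.toList
  let r := l.foldl (pvStepA (l.length : Int)) (0, 0, [])
  String.mk r.2.2

-- ===== PORT B =====
-- port of B's while-loop; masked[i:i+4] = (masked.drop i).take 4 exactly (nonnegative bounds);
-- ''.join(parts) of the appended pieces is their concatenation, so the port accumulates the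
-- joined List Char directly (exact)
def pvLoopB (masked : List Char) (i : Nat) (result : List Char) : List Char :=
  if i < masked.length then
    let chunk := (masked.drop i).take 4
    let result := result ++ chunk
    let result := if chunk.length == 4 then result ++ [' '] else result
    pvLoopB masked (i + 4) result
  else result
termination_by masked.length - i
decreasing_by omega

def get_mask_card_number_alt (bank_card : String) : String :=
  let l := bank_card.toList
  -- bank_card[:6] = take 6, bank_card[6:12] = (drop 6).take 6, bank_card[12:] = drop 12 (exact for nonneg bounds);
  -- '*' * len(...) = replicate
  let masked := l.take 6 ++ List.replicate ((l.drop 6).take 6).length '*' ++ l.drop 12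
  String.mk (pvLoopB masked 0 [])

-- ===== PRECONDITION & SPEC =====
def Spec_get_mask_card_number (bank_card : String) (out : String) : Prop := out = get_mask_card_number_alt bank_card
instance (bank_card : String) (out : String) : Decidable (Spec_get_mask_card_number bank_card out) := by unfold Spec_get_mask_card_number; infer_instance

-- ===== CLAIM (what is proved, stated in full; the proofs are below) =====
def Claim_equal_get_mask_card_number : Prop := ∀ (bank_card : String), Dom_get_mask_card_number bank_card → Spec_get_mask_card_number bank_card (get_mask_card_number bank_card)

-- ===== LEMMAS AND PROOFS =====

-- common form: mask a char by its 1-based position, insert a space after every 4th position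
def pvMask (k : Nat) : List Char → List Char
  | [] => []
  | x :: xs => (if k + 1 ≤ 6 ∨ k + 1 > 12 then x else '*') :: pvMask (k + 1) xs

def pvSpc (k : Nat) : List Char → List Char
  | [] => []
  | x :: xs => x :: (if (k + 1) % 4 = 0 then ' ' :: pvSpc (k + 1) xs else pvSpc (k + 1) xs)

def pvF (k : Nat) : List Char → List Char
  | [] => []
  | x :: xs =>
      (if k + 1 ≤ 6 ∨ k + 1 > 12 then x else '*') ::
        (if (k + 1) % 4 = 0 then ' ' :: pvF (k + 1) xs else pvF (k + 1) xs)

theorem pvF_eq_spc_mask (l : List Char) : ∀ k, pvF k l = pvSpc k (pvMask k l) := by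
  induction l with
  | nil => intro k; rfl
  | cons x xs ih =>
      intro k
      simp only [pvF, pvMask, pvSpc, ih]

-- A's fold computes pvF
theorem foldA_eq (len : Int) (l : List Char) :
    ∀ (k : Nat) (r : List Char),
      (l.foldl (pvStepA len) ((k : Int), (k : Int), r)).2.2 = r ++ pvF k l := by
  induction l with
  | nil => intro k r; simp [pvF]
  | cons x xs ih =>
      intro k r
      have hstep : pvStepA len ((k : Int), (k : Int), r) x
          = (((k + 1 : Nat) : Int), ((k + 1 : Nat) : Int),
             r ++ [(if k + 1 ≤ 6 ∨ k + 1 > 12 then x else '*')]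
               ++ (if (k + 1) % 4 = 0 then [' '] else [])) := by
        simp only [pvStepA, pyStrNeInt, Bool.and_true]
        have h1 : ((k : Int) + 1 ≤ 6 ∨ (k : Int) + 1 > 12) ↔ (k + 1 ≤ 6 ∨ k + 1 > 12) := by
          omega
        have h2 : (((k : Int) + 1) % 4 == 0) = decide ((k + 1) % 4 = 0) := by
          by_cases h : (k + 1) % 4 = 0 <;> simp [beq_iff_eq, h] <;> omega
        rcases Classical.em (k + 1 ≤ 6 ∨ k + 1 > 12) with h | h
        · rw [if_pos (h1.mpr h)]
          by_cases h4 : (k + 1) % 4 = 0 <;> simp [h2, h4, h] <;> push_cast <;> ring_nf <;> (intros; omega)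
        · rw [if_neg (fun hc => h (h1.mp hc))]
          by_cases h4 : (k + 1) % 4 = 0 <;> simp [h2, h4, h] <;> push_cast <;> ring_nf <;> (intros; omega)
      rw [List.foldl_cons, hstep, ih (k + 1)]
      by_cases h4 : (k + 1) % 4 = 0 <;> simp [pvF, h4]

-- the masked slice concatenation computes pvMask 0
theorem pvMask_ge12 (l : List Char) : ∀ k, 12 ≤ k → pvMask k l = l := by
  induction l with
  | nil => intro k _; rfl
  | cons x xs ih =>
      intro k hk
      simp only [pvMask]
      rw [if_pos (by omega), ih (k + 1) (by omega)]

theorem pvMask_mid (l : List Char) : ∀ k, 6 ≤ k → k ≤ 12 →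
    pvMask k l = List.replicate ((l.take (12 - k)).length) '*' ++ l.drop (12 - k) := by
  induction l with
  | nil => intro k _ _; simp [pvMask]
  | cons x xs ih =>
      intro k h6 h12
      by_cases hk : k = 12
      · subst hk; simp [pvMask_ge12 (x :: xs) 12 (le_refl _)]
      · have hlt : k < 12 := by omega
        simp only [pvMask]
        rw [if_neg (by omega), ih (k + 1) (by omega) (by omega)]
        have h1 : 12 - k = (12 - (k + 1)) + 1 := by omega
        simp [h1, List.replicate_succ]

theorem pvMask_lo (l : List Char) : ∀ k, k ≤ 6 →
    pvMask k l = l.take (6 - k)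
      ++ List.replicate (((l.drop (6 - k)).take 6).length) '*'
      ++ (l.drop (6 - k)).drop 6 := by
  induction l with
  | nil => intro k _; simp [pvMask]
  | cons x xs ih =>
      intro k hk
      by_cases h6 : k = 6
      · subst h6
        rw [pvMask_mid (x :: xs) 6 (le_refl _) (by omega)]
        simp
      · have hlt : k < 6 := by omega
        simp only [pvMask]
        rw [if_pos (by omega), ih (k + 1) (by omega)]
        have h1 : 6 - k = (6 - (k + 1)) + 1 := by omega
        simp [h1]

-- pvSpc peels one 4-block at a block-aligned counter
theorem pvSpc_chunk (l : List Char) (k : Nat) (hk : k % 4 = 0) :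
    pvSpc k l = if 4 ≤ l.length then l.take 4 ++ ' ' :: pvSpc (k + 4) (l.drop 4) else l := by
  have h1 : ¬ (k + 1) % 4 = 0 := by omega
  have h2 : ¬ (k + 2) % 4 = 0 := by omega
  have h3 : ¬ (k + 3) % 4 = 0 := by omega
  match l with
  | [] => simp [pvSpc]
  | [a] => simp [pvSpc, h1]
  | [a, b] => simp [pvSpc, h1, h2]
  | [a, b, c] => simp [pvSpc, h1, h2, h3]
  | a :: b :: c :: d :: rest =>
      rw [if_pos (by simp : 4 ≤ (a :: b :: c :: d :: rest).length)]
      simp [pvSpc, h1, h2, h3, if_pos (by omega : (k + 4) % 4 = 0)]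

-- B's while-loop computes pvSpc on the tail it has not consumed yet
theorem pvLoopB_eq (masked : List Char) (n : Nat) : ∀ (i : Nat) (r : List Char),
    masked.length ≤ i + n → i % 4 = 0 →
    pvLoopB masked i r = r ++ pvSpc i (masked.drop i) := by
  induction n with
  | zero =>
      intro i r hn hi
      rw [pvLoopB, if_neg (by omega)]
      have hd : masked.drop i = [] := List.drop_eq_nil_of_le (by omega)
      simp [hd, pvSpc]
  | succ n ih =>
      intro i r hn hi
      by_cases h : i < masked.length
      · rw [pvLoopB, if_pos h]
        simp only []
        have hdrop : masked.drop (i + 4) = (masked.drop i).drop 4 := by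
          rw [List.drop_drop]
        have hlen : (masked.drop i).length = masked.length - i := List.length_drop ..
        rw [pvSpc_chunk _ i hi]
        by_cases h4 : 4 ≤ (masked.drop i).length
        · have hc : (((masked.drop i).take 4).length == 4) = true := by
            simp [List.length_take]; omega
          rw [hc]
          simp only [if_true]
          rw [ih (i + 4) _ (by omega) (by omega), hdrop, if_pos h4]
          simp
        · have hc : (((masked.drop i).take 4).length == 4) = false := by
            simp [List.length_take]; omega
          rw [hc]
          simp only [Bool.false_eq_true, if_false]
          rw [ih (i + 4) _ (by omega) (by omega), hdrop, if_neg h4]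
          have ht : (masked.drop i).take 4 = masked.drop i :=
            List.take_of_length_le (by omega)
          have hd4 : (masked.drop i).drop 4 = [] := List.drop_eq_nil_of_le (by omega)
          simp [ht, hd4, pvSpc]
      · rw [pvLoopB, if_neg h]
        have hd : masked.drop i = [] := List.drop_eq_nil_of_le (by omega)
        simp [hd, pvSpc]

-- ===== VERDICT (by name: the statement is the Claim_ definition above) =====
theorem get_mask_card_number_spec : Claim_equal_get_mask_card_number := by
  intro bank_card _
  unfold Spec_get_mask_card_number get_mask_card_number get_mask_card_number_alt
  simp only []
  set l := bank_card.toList with hl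
  have hA : (l.foldl (pvStepA (l.length : Int)) (0, 0, [])).2.2 = pvF 0 l := by
    have := foldA_eq (l.length : Int) l 0 []
    simpa using this
  have hM : l.take 6 ++ List.replicate ((l.drop 6).take 6).length '*' ++ l.drop 12
      = pvMask 0 l := by
    rw [pvMask_lo l 0 (by omega)]
    simp [List.drop_drop]
  have hG : pvLoopB (pvMask 0 l) 0 [] = [] ++ pvSpc 0 ((pvMask 0 l).drop 0) :=
    pvLoopB_eq (pvMask 0 l) (pvMask 0 l).length 0 [] (by omega) rfl
  rw [hA, hM, hG]
  simp [← pvF_eq_spc_mask]
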